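-- pv_equiv track=rewrite | github.com/MritunjayKumar74/Secondary-Structure-Prediction | structure_predictor.py | find_sheet_nucleation_sites
-- ===== SOURCE A (Python) =====
-- P_beta = {
--     'M': 1.67, 'V': 1.65, 'I': 1.60, 'C': 1.30, 'Y': 1.29,
--     'F': 1.28, 'Q': 1.23, 'L': 1.22, 'T': 1.20, 'W': 1.19,
--     'A': 0.97, 'R': 0.90, 'G': 0.81, 'D': 0.80, 'K': 0.74,
--     'S': 0.72, 'H': 0.71, 'N': 0.65, 'P': 0.62, 'E': 0.26
-- }
--
-- def find_sheet_nucleation_sites(sequence):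
--     nucleation_sites = []
--
--     for i in range(len(sequence) - 4):
--         part = sequence[i:i+5]
--
--         count = 0
--
--         for x in part:
--             if P_beta[x] > 1:
--                 count+=1
--
--         if count >= 3:
--             nucleation_sites.append((i, i+5))
--
--     return nucleation_sites
-- ===== SOURCE B (Python) =====
-- P_beta = {
--     'M': 1.67, 'V': 1.65, 'I': 1.60, 'C': 1.30, 'Y': 1.29,
--     'F': 1.28, 'Q': 1.23, 'L': 1.22, 'T': 1.20, 'W': 1.19,
--     'A': 0.97, 'R': 0.90, 'G': 0.81, 'D': 0.80, 'K': 0.74,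
--     'S': 0.72, 'H': 0.71, 'N': 0.65, 'P': 0.62, 'E': 0.26
-- }
--
-- def find_sheet_nucleation_sites(sequence):
--     n = len(sequence)
--     if n < 5:
--         return []
--     prefix = [0]
--     for x in sequence:
--         prefix.append(prefix[-1] + (1 if P_beta[x] > 1 else 0))
--     return [(i, i + 5) for i in range(n - 4) if prefix[i + 5] - prefix[i] >= 3]
-- ===== Notes on version B (the rewrite author's own statement) =====
-- stated objective: faster
-- what changed: Replaces the per-window rescan (each length-5 window recounted from scratch) by a prefix-count array built in one pass, so each window test is a constant-time subtraction.
import Mathlib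
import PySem

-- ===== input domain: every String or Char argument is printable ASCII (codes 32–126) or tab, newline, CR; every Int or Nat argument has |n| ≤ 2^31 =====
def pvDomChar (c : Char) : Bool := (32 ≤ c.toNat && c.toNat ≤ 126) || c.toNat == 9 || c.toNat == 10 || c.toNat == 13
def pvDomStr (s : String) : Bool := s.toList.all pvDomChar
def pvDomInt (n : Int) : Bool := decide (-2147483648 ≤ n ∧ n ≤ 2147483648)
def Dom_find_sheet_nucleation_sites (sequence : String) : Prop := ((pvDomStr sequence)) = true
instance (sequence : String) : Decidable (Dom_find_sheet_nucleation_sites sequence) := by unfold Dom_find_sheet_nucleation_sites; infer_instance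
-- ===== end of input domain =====

-- B replaces A's per-window rescan by a prefix-count array built in one pass (constant-time window test).

-- ===== PORT A =====
def P_beta : PySem.Dict Char Rat := PySem.Dict.ofList
  [('M', 1.67), ('V', 1.65), ('I', 1.60), ('C', 1.30), ('Y', 1.29),
   ('F', 1.28), ('Q', 1.23), ('L', 1.22), ('T', 1.20), ('W', 1.19),
   ('A', 0.97), ('R', 0.90), ('G', 0.81), ('D', 0.80), ('K', 0.74),
   ('S', 0.72), ('H', 0.71), ('N', 0.65), ('P', 0.62), ('E', 0.26)]

-- literal port of A: for each i in range(len-4), rescan the 5-char slice and count high-P_beta residues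
def find_sheet_nucleation_sites (sequence : String) : List (Int × Int) :=
  (PySem.List.pyRange 0 ((sequence.length : Int) - 4) 1).foldl (fun nucleation_sites i =>
    let part := PySem.Str.slice sequence (some i) (some (i + 5))
    let count := part.toList.foldl (fun count x =>
      if PySem.Dict.getD P_beta x 0 > 1 then count + 1 else count) (0 : Int)
    if count ≥ 3 then nucleation_sites ++ [(i, i + 5)] else nucleation_sites) []

-- ===== PORT B =====
-- literal port of B: early return for n < 5, one-pass prefix array, then a filtered comprehension
def find_sheet_nucleation_sites_alt (sequence : String) : List (Int × Int) :=
  let n : Int := (sequence.length : Int)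
  if n < 5 then []
  else
    let pre := sequence.toList.foldl (fun p x =>
      p ++ [PySem.List.pyGetD p (-1) 0 +
            (if PySem.Dict.getD P_beta x 0 > 1 then (1 : Int) else 0)]) [(0 : Int)]
    ((PySem.List.pyRange 0 (n - 4) 1).filter (fun i =>
        decide (PySem.List.pyGetD pre (i + 5) 0 - PySem.List.pyGetD pre i 0 ≥ 3))).map
      (fun i => (i, i + 5))

-- ===== PRECONDITION & SPEC =====
-- Pre_ excludes exactly the inputs where Python A raises KeyError: a sequence of length ≥ 5
-- containing a character that is not one of the 20 amino-acid keys of P_beta.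
def Pre_find_sheet_nucleation_sites (sequence : String) : Prop :=
  sequence.length < 5 ∨ sequence.toList.all (fun c => c ∈ "MVICYFQLTWARGDKSHNPE".toList) = true
instance (sequence : String) : Decidable (Pre_find_sheet_nucleation_sites sequence) := by
  unfold Pre_find_sheet_nucleation_sites; infer_instance

def pvWitness_find_sheet_nucleation_sites : String := "MVICEAG"

def Spec_find_sheet_nucleation_sites (sequence : String) (out : List (Int × Int)) : Prop := out = find_sheet_nucleation_sites_alt sequence
instance (sequence : String) (out : List (Int × Int)) : Decidable (Spec_find_sheet_nucleation_sites sequence out) := by unfold Spec_find_sheet_nucleation_sites; infer_instance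

-- ===== CLAIM (what is proved, stated in full; the proofs are below) =====
def Claim_equal_find_sheet_nucleation_sites : Prop := ∀ (sequence : String), Dom_find_sheet_nucleation_sites sequence → Pre_find_sheet_nucleation_sites sequence → Spec_find_sheet_nucleation_sites sequence (find_sheet_nucleation_sites sequence)

-- ===== LEMMAS AND PROOFS =====

def pvHi (x : Char) : Bool := decide (PySem.Dict.getD P_beta x 0 > 1)

def pvB (x : Char) : Int := if PySem.Dict.getD P_beta x 0 > 1 then 1 else 0

def pvSums (c : Int) : List Char → List Int
  | [] => []
  | x :: xs => (c + pvB x) :: pvSums (c + pvB x) xs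

theorem pvSums_foldl (l : List Char) : ∀ (p : List Int) (c : Int),
    PySem.List.pyGetD p (-1) 0 = c →
    l.foldl (fun p x => p ++ [PySem.List.pyGetD p (-1) 0 +
      (if PySem.Dict.getD P_beta x 0 > 1 then (1 : Int) else 0)]) p = p ++ pvSums c l := by
  induction l with
  | nil => intro p c h; simp [pvSums]
  | cons x xs ih =>
    intro p c h
    simp only [List.foldl_cons]
    rw [h]
    show List.foldl (fun p x => p ++ [PySem.List.pyGetD p (-1) 0 +
      if PySem.Dict.getD P_beta x 0 > 1 then (1:Int) else 0]) (p ++ [c + pvB x]) xs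
      = p ++ pvSums c (x :: xs)
    rw [ih (p ++ [c + pvB x]) (c + pvB x)
      (by simp [PySem.List.pyGetD, PySem.List.pyGet?, PySem.List.pyIdx?])]
    simp [pvSums, List.append_assoc]

theorem pvSums_getD (l : List Char) : ∀ (c : Int) (j : Nat), j ≤ l.length →
    (c :: pvSums c l).getD j 0 = c + ((l.take j).countP pvHi : Int) := by
  induction l with
  | nil =>
    intro c j h
    have hj : j = 0 := Nat.le_zero.mp h
    subst hj
    simp [pvSums]
  | cons x xs ih =>
    intro c j h
    cases j with
    | zero => simp
    | succ j =>
      simp only [pvSums, List.getD_cons_succ, List.take_succ_cons, List.countP_cons]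
      rw [ih (c + pvB x) j (by simpa using h)]
      by_cases hx : pvHi x
      · have : pvB x = 1 := by simp [pvB, pvHi] at hx ⊢; exact hx
        simp [hx, this]; ring
      · have : pvB x = 0 := by simp [pvB, pvHi] at hx ⊢; exact hx
        simp [hx, this]


-- ===== VERDICT (by name: the statement is the Claim_ definition above) =====
theorem find_sheet_nucleation_sites_spec : Claim_equal_find_sheet_nucleation_sites := by
  intro s _hdom _hpre
  unfold Spec_find_sheet_nucleation_sites
  unfold find_sheet_nucleation_sites find_sheet_nucleation_sites_alt
  by_cases h5 : (s.length : Int) < 5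
  · rw [if_pos h5, PySem.List.pyRange_one_eq_nil (by omega)]
    simp
  · rw [if_neg h5]
    rw [pvSums_foldl s.toList [(0:Int)] 0 (by decide)]
    rw [PySem.List.foldl_append_ite
      (p := fun i => 3 ≤ (PySem.Str.slice s (some i) (some (i + 5))).toList.foldl
        (fun count x => if PySem.Dict.getD P_beta x 0 > 1 then count + 1 else count) (0 : Int))
      (f := fun i => (i, i + 5))]
    rw [List.nil_append]
    congr 1
    apply List.filter_congr
    intro i hi
    rw [PySem.List.mem_pyRange_one] at hi
    obtain ⟨hi0, hilt⟩ := hi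
    -- name k
    obtain ⟨k, rfl⟩ : ∃ k : Nat, i = (k : Int) := ⟨i.toNat, (Int.toNat_of_nonneg hi0).symm⟩
    have hk5 : k + 5 ≤ s.toList.length := by
      have := s.length_toList ▸ hilt; omega
    -- A's count
    rw [PySem.List.foldl_ite_add_one (p := fun x => PySem.Dict.getD P_beta x 0 > 1)]
    -- slice to take/drop
    have hslice : (PySem.Str.slice s (some (k:Int)) (some ((k:Int) + 5))).toList
        = (s.toList.drop k).take 5 := by
      simp only [PySem.Str.toList_slice]
      rw [show ((k:Int) + 5) = ((k:Int) + ((5:Nat):Int)) from by norm_num]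
      exact PySem.List.slice_natCast_add s.toList k 5
    rw [hslice]
    -- B's getD's
    have h1 : ((k:Int) + 5) = ((k + 5 : Nat) : Int) := by push_cast; ring
    rw [h1, PySem.List.pyGetD_natCast, PySem.List.pyGetD_natCast,
      List.singleton_append]
    rw [pvSums_getD s.toList 0 (k+5) hk5, pvSums_getD s.toList 0 k (by omega)]
    have htake : s.toList.take (k+5) = s.toList.take k ++ (s.toList.drop k).take 5 :=
      List.take_add
    rw [htake, List.countP_append]
    simp only [decide_eq_decide]
    have : (fun x => decide (PySem.Dict.getD P_beta x 0 > 1)) = pvHi := rfl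
    rw [this]
    omega
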